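-- pv_equiv track=rewrite | github.com/Vedantk1301/Sortmeai | backend/retrievers/catalog_retriever.py | _is_disallowed_product
-- ===== SOURCE A (Python) =====
-- from typing import Any, Dict, List
--
-- def _is_disallowed_product(product: Dict[str, Any]) -> bool:
--     blocked = {
--         "socks", "sock", "hosiery", "stocking", "brief", "briefs",
--         "panty", "panties", "lingerie", "innerwear", "underwear",
--         "undergarment", "bra", "camisole", "thermal", "thermals",
--         "mask", "muffler"
--     }
--     text_parts = [
--         str(product.get("category") or ""),
--         str(product.get("title") or ""),
--     ]
--     text = " ".join(text_parts).lower()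
--     return any(tok in text for tok in blocked)
-- ===== SOURCE B (Python) =====
-- from typing import Any, Dict
--
-- # Blocked keywords grouped by length: at each text position we slice the next
-- # L characters and test set membership, instead of running a substring search
-- # per keyword.
-- _BY_LEN = {
--     3: frozenset({"bra"}),
--     4: frozenset({"sock", "mask"}),
--     5: frozenset({"socks", "brief", "panty"}),
--     6: frozenset({"briefs"}),
--     7: frozenset({"hosiery", "panties", "thermal", "muffler"}),
--     8: frozenset({"stocking", "lingerie", "camisole", "thermals"}),
--     9: frozenset({"innerwear", "underwear"}),
--     12: frozenset({"undergarment"}),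
-- }
--
-- def _is_disallowed_product(product: Dict[str, Any]) -> bool:
--     text = (str(product.get("category") or "").lower() + " "
--             + str(product.get("title") or "").lower())
--     for i in range(len(text)):
--         for length, words in _BY_LEN.items():
--             if text[i:i + length] in words:
--                 return True
--     return False
-- ===== Notes on version B (the rewrite author's own statement) =====
-- stated objective: alternative
-- what changed: B lowers the two parts separately and, instead of running any(tok in text) substring searches per keyword, groups the blocked words into a length-indexed table of frozensets and at each text position slices the next L characters and tests set membership.
import Mathlib
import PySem

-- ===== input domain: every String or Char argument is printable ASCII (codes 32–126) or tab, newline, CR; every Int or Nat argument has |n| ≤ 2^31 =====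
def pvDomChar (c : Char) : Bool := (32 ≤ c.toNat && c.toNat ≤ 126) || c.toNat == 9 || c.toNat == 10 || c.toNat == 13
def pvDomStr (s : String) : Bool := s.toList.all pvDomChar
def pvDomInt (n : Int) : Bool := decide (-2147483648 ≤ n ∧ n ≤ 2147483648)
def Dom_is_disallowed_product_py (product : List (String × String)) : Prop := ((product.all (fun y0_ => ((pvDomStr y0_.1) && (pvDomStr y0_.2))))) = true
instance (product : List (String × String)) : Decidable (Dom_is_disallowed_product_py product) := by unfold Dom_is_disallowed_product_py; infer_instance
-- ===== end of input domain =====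

-- B replaces A's ~18 independent `tok in text` substring searches by a length-indexed
-- table of blocked-word sets: at each position it slices the next L characters and tests
-- set membership (objective: alternative).


-- ===== PORT A =====
def pvBlockedA : PySem.Set String := PySem.Set.ofList
  ["socks", "sock", "hosiery", "stocking", "brief", "briefs",
   "panty", "panties", "lingerie", "innerwear", "underwear",
   "undergarment", "bra", "camisole", "thermal", "thermals",
   "mask", "muffler"]

def is_disallowed_product_py (product : List (String × String)) : Bool :=
  let blocked := pvBlockedA
  let text_parts : List String :=
    [PySem.Dict.getD (PySem.Dict.mk product) "category" "", PySem.Dict.getD (PySem.Dict.mk product) "title" ""]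
  let text := PySem.Str.lower (PySem.Str.join " " text_parts)
  blocked.any (fun tok => PySem.Str.isIn tok text)

-- ===== PORT B =====
-- the module-level length-indexed table _BY_LEN of Source B
def pvByLen : List (Nat × List (List Char)) :=
  [(3, [String.toList "bra"]),
   (4, [String.toList "sock", String.toList "mask"]),
   (5, [String.toList "socks", String.toList "brief", String.toList "panty"]),
   (6, [String.toList "briefs"]),
   (7, [String.toList "hosiery", String.toList "panties", String.toList "thermal", String.toList "muffler"]),
   (8, [String.toList "stocking", String.toList "lingerie", String.toList "camisole", String.toList "thermals"]),
   (9, [String.toList "innerwear", String.toList "underwear"]),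
   (12, [String.toList "undergarment"])]

def is_disallowed_product_py_alt (product : List (String × String)) : Bool :=
  let text : List Char :=
    PySem.Chars.lower (PySem.Dict.getD (PySem.Dict.mk product) "category" "").toList
      ++ ' ' :: PySem.Chars.lower (PySem.Dict.getD (PySem.Dict.mk product) "title" "").toList
  -- text[i:i+L] is (text.drop i).take L: exact here since 0 ≤ i (Python slice clamps at the end)
  (List.range text.length).any fun i =>
    pvByLen.any fun p => p.2.contains ((text.drop i).take p.1)

-- ===== PRECONDITION & SPEC =====
def Spec_is_disallowed_product_py (product : List (String × String)) (out : Bool) : Prop := out = is_disallowed_product_py_alt product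
instance (product : List (String × String)) (out : Bool) : Decidable (Spec_is_disallowed_product_py product out) := by unfold Spec_is_disallowed_product_py; infer_instance

-- ===== CLAIM (what is proved, stated in full; the proofs are below) =====
def Claim_equal_is_disallowed_product_py : Prop := ∀ (product : List (String × String)), Dom_is_disallowed_product_py product → Spec_is_disallowed_product_py product (is_disallowed_product_py product)

-- ===== LEMMAS AND PROOFS =====

-- the two ports build the same lowered character list for `text`
theorem pv_text_eq (c t : String) :
    (PySem.Str.lower (PySem.Str.join " " [c, t])).toList
      = PySem.Chars.lower c.toList ++ ' ' :: PySem.Chars.lower t.toList := by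
  rw [PySem.Str.toList_lower, PySem.Str.toList_join, List.map_cons, List.map_cons,
    List.map_nil, PySem.Chars.join_cons_cons, PySem.Chars.join_singleton]
  simp [PySem.Chars.lower]
  decide

theorem pv_blockedA_eq : (pvBlockedA : List String) =
    ["socks", "sock", "hosiery", "stocking", "brief", "briefs",
     "panty", "panties", "lingerie", "innerwear", "underwear",
     "undergarment", "bra", "camisole", "thermal", "thermals",
     "mask", "muffler"] := by decide

-- every word in the table has the length it is filed under
theorem pv_byLen_lengths : ∀ p ∈ pvByLen, ∀ w ∈ p.2, w.length = p.1 := by decide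

-- a length-L slice equals a length-L word iff that word starts at the position
theorem pv_take_eq_iff (s w : List Char) (L : Nat) (hw : w.length = L) :
    (s.take L == w) = true ↔ w <+: s := by
  rw [beq_iff_eq, eq_comm, ← hw, ← List.prefix_iff_eq_take]

-- ===== VERDICT (by name: the statement is the Claim_ definition above) =====
theorem is_disallowed_product_py_spec : Claim_equal_is_disallowed_product_py := by
  intro product _
  unfold Spec_is_disallowed_product_py
  unfold is_disallowed_product_py is_disallowed_product_py_alt
  simp only [pv_blockedA_eq]
  rw [Bool.eq_iff_iff]
  simp only [List.any_eq_true, List.mem_range, PySem.Str.isIn_eq, pv_text_eq,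
    List.contains_eq_any_beq]
  set s : List Char :=
    PySem.Chars.lower (PySem.Dict.getD (PySem.Dict.mk product) "category" "").toList
      ++ ' ' :: PySem.Chars.lower (PySem.Dict.getD (PySem.Dict.mk product) "title" "").toList
    with hs
  constructor
  · rintro ⟨tok, htok, hin⟩
    obtain ⟨j, hj⟩ := (PySem.Chars.exists_prefix_drop_iff_isIn tok.toList s).mpr hin
    have hne : tok.toList ≠ [] := by fin_cases htok <;> decide
    have hjlt : j < s.length := by
      by_contra hge
      rw [List.drop_eq_nil_of_le (by omega)] at hj
      exact hne (List.prefix_nil.mp hj)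
    refine ⟨j, hjlt, ?_⟩
    have hmem : ∃ p ∈ pvByLen, tok.toList ∈ p.2 := by fin_cases htok <;> decide
    obtain ⟨p, hp, hwp⟩ := hmem
    refine ⟨p, hp, tok.toList, hwp, ?_⟩
    exact (pv_take_eq_iff _ _ _ (pv_byLen_lengths p hp _ hwp)).mpr hj
  · rintro ⟨i, _, p, hp, w, hw, hbeq⟩
    have hpre : w <+: s.drop i :=
      (pv_take_eq_iff _ _ _ (pv_byLen_lengths p hp _ hw)).mp hbeq
    have htok : ∃ tok ∈ ["socks", "sock", "hosiery", "stocking", "brief", "briefs",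
        "panty", "panties", "lingerie", "innerwear", "underwear",
        "undergarment", "bra", "camisole", "thermal", "thermals",
        "mask", "muffler"], String.toList tok = w := by
      fin_cases hp <;> fin_cases hw <;> decide
    obtain ⟨tok, htokmem, htokeq⟩ := htok
    refine ⟨tok, htokmem, ?_⟩
    rw [← PySem.Chars.exists_prefix_drop_iff_isIn]
    exact ⟨i, htokeq ▸ hpre⟩
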